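-- pv_equiv track=rewrite | github.com/philip-papasavvas/founders-ai-day | meal_planning_amp/meal_planning/planner.py | _contiguous_day_groups
-- ===== SOURCE A (Python) =====
-- def _contiguous_day_groups(total_days: int, group_count: int) -> tuple[tuple[int, ...], ...]:
--     """Split a run of days into compact contiguous groups."""
--
--     base_size = total_days // group_count
--     remainder = total_days % group_count
--     groups: list[tuple[int, ...]] = []
--     start = 0
--
--     for index in range(group_count):
--         size = base_size + (1 if index < remainder else 0)
--         groups.append(tuple(range(start, start + size)))
--         start += size
--
--     return tuple(groups)
-- ===== SOURCE B (Python) =====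
-- def _contiguous_day_groups(total_days: int, group_count: int) -> tuple[tuple[int, ...], ...]:
--     """Split a run of days into compact contiguous groups (closed-form starts)."""
--     base_size = total_days // group_count
--     remainder = total_days % group_count
--     return tuple(
--         tuple(range(index * base_size + min(index, remainder),
--                     index * base_size + min(index, remainder)
--                     + base_size + (1 if index < remainder else 0)))
--         for index in range(group_count)
--     )
-- ===== Notes on version B (the rewrite author's own statement) =====
-- stated objective: alternative
-- what changed: Replaces the sequential loop carrying a running `start` accumulator with independent per-group construction: each group's start is computed in closed form as index*base_size + min(index, remainder), so the result is a stateless map over range(group_count).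
import Mathlib
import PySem

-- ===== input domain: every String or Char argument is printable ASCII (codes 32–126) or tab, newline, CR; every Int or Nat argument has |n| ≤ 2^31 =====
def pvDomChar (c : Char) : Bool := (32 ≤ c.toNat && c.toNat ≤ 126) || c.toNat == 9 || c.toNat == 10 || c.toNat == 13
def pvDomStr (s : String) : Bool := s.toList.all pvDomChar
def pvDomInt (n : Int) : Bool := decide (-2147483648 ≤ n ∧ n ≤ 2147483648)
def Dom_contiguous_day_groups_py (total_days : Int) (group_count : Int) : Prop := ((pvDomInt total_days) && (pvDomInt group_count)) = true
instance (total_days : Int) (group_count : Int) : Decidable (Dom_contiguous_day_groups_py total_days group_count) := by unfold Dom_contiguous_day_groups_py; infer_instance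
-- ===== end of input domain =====

-- B removes A's running `start` accumulator: each group's start is the closed form
-- index*base_size + min(index, remainder), so groups are built by an independent map instead of a stateful loop.

-- ===== PORT A =====
def contiguous_day_groups_py (total_days : Int) (group_count : Int) : List (List Int) :=
  let base_size := PySem.Int.floordiv total_days group_count
  let remainder := PySem.Int.mod total_days group_count
  let st := (PySem.List.pyRange 0 group_count 1).foldl
    (fun (st : List (List Int) × Int) index =>
      let size := base_size + (if index < remainder then 1 else 0)
      (st.1 ++ [PySem.List.pyRange st.2 (st.2 + size) 1], st.2 + size))
    ([], 0)
  st.1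

-- ===== PORT B =====
def contiguous_day_groups_py_alt (total_days : Int) (group_count : Int) : List (List Int) :=
  let base_size := PySem.Int.floordiv total_days group_count
  let remainder := PySem.Int.mod total_days group_count
  (PySem.List.pyRange 0 group_count 1).map (fun index =>
    PySem.List.pyRange (index * base_size + min index remainder)
      (index * base_size + min index remainder + base_size + (if index < remainder then 1 else 0)) 1)

-- ===== PRECONDITION & SPEC =====
-- Pre_ excludes only group_count = 0, where Python A raises ZeroDivisionError (and B raises too).
def Pre_contiguous_day_groups_py (total_days : Int) (group_count : Int) : Prop := group_count ≠ 0
instance (total_days : Int) (group_count : Int) : Decidable (Pre_contiguous_day_groups_py total_days group_count) := by unfold Pre_contiguous_day_groups_py; infer_instance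
def pvWitness_contiguous_day_groups_py : Int × Int := (10, 3)

def Spec_contiguous_day_groups_py (total_days : Int) (group_count : Int) (out : List (List Int)) : Prop := out = contiguous_day_groups_py_alt total_days group_count
instance (total_days : Int) (group_count : Int) (out : List (List Int)) : Decidable (Spec_contiguous_day_groups_py total_days group_count out) := by unfold Spec_contiguous_day_groups_py; infer_instance

-- ===== CLAIM (what is proved, stated in full; the proofs are below) =====
def Claim_equal_contiguous_day_groups_py : Prop := ∀ (total_days : Int) (group_count : Int), Dom_contiguous_day_groups_py total_days group_count → Pre_contiguous_day_groups_py total_days group_count → Spec_contiguous_day_groups_py total_days group_count (contiguous_day_groups_py total_days group_count)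

-- ===== LEMMAS AND PROOFS =====

-- Loop invariant: after processing indices 0..n-1, the accumulator is the map of the
-- closed-form group builder over those indices, and `start` equals n*base + min n rem.
theorem cdg_loop_invariant (base rem : Int) (hrem : 0 ≤ rem) (n : Nat) :
    ((PySem.List.pyRange 0 (n : Int) 1).foldl
      (fun (st : List (List Int) × Int) index =>
        let size := base + (if index < rem then 1 else 0)
        (st.1 ++ [PySem.List.pyRange st.2 (st.2 + size) 1], st.2 + size))
      ([], 0))
    = ((PySem.List.pyRange 0 (n : Int) 1).map (fun index =>
        PySem.List.pyRange (index * base + min index rem)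
          (index * base + min index rem + base + (if index < rem then 1 else 0)) 1),
       (n : Int) * base + min (n : Int) rem) := by
  induction n with
  | zero => simpa using hrem
  | succ n ih =>
    have hstep : PySem.List.pyRange 0 ((n + 1 : Nat) : Int) 1
        = PySem.List.pyRange 0 (n : Int) 1 ++ [(n : Int)] := by
      push_cast
      exact PySem.List.pyRange_one_succ_right (by positivity)
    rw [hstep, List.foldl_append, ih, List.map_append]
    simp only [List.foldl_cons, List.foldl_nil, List.map_cons, List.map_nil, Prod.mk.injEq]
    refine ⟨?_, ?_⟩
    · congr 2
      ring
    · push_cast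
      have : min ((n : Int) + 1) rem = min (n : Int) rem + (if (n : Int) < rem then 1 else 0) := by
        split_ifs with h <;> omega
      rw [this]; ring

-- ===== VERDICT (by name: the statement is the Claim_ definition above) =====
theorem contiguous_day_groups_py_spec : Claim_equal_contiguous_day_groups_py := by
  intro total_days group_count _ hpre
  unfold Spec_contiguous_day_groups_py contiguous_day_groups_py contiguous_day_groups_py_alt
  rcases lt_trichotomy group_count 0 with hlt | heq | hgt
  · rw [PySem.List.pyRange_one_eq_nil (by omega)]
    simp
  · exact absurd heq hpre
  · have hrem : 0 ≤ PySem.Int.mod total_days group_count := by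
      rw [PySem.Int.mod_eq_emod_of_pos hgt]
      exact Int.emod_nonneg _ (by omega)
    obtain ⟨n, rfl⟩ : ∃ n : Nat, group_count = (n : Int) := ⟨group_count.toNat, by omega⟩
    dsimp only
    rw [cdg_loop_invariant _ _ hrem]
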